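-- pv_equiv track=rewrite | github.com/pavelaizen/iptv-playlist | app/epg.py | _extract_extinf_name
-- ===== SOURCE A (Python) =====
-- def _extract_extinf_name(value: str) -> str | None:
--     in_quotes = False
--
--     for index, char in enumerate(value):
--         if char == '"':
--             in_quotes = not in_quotes
--             continue
--
--         if char == "," and not in_quotes:
--             name = value[index + 1 :].strip()
--             return name or None
--
--     return None
-- ===== SOURCE B (Python) =====
-- def _extract_extinf_name(value: str) -> str | None:
--     # Hop from comma to comma with str.find; a comma is unquoted iff the
--     # number of '"' characters before it is even.
--     start = 0
--     while True:
--         j = value[start:].find(',')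
--         if j == -1:
--             return None
--         idx = start + j
--         if value[:idx].count('"') % 2 == 0:
--             name = value[idx + 1:].strip()
--             return name or None
--         start = idx + 1
-- ===== Notes on version B (the rewrite author's own statement) =====
-- stated objective: alternative
-- what changed: Replaces A's single character-by-character scan with a quote-parity toggle by a comma-hopping search: repeatedly str.find the next comma and decide whether it is quoted by the parity of str.count of quote characters in the prefix before it.
import Mathlib
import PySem

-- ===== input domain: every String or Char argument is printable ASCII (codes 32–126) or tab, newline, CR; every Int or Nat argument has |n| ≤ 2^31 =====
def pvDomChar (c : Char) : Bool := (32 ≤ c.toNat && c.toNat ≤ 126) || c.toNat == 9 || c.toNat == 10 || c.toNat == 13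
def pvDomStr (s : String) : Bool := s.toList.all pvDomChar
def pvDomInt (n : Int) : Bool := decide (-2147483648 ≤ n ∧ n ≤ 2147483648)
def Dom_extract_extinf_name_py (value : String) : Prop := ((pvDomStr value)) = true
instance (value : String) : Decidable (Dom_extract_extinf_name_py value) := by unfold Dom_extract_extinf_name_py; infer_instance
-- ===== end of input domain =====

-- B replaces A's character-by-character scan with an in_quotes toggle by a comma-hopping search:
-- repeatedly find the next comma and accept it iff the count of '"' before it is even.

-- ===== PORT A =====
-- value[index+1:].strip(); 'name or None'
def pvRetA (full : List Char) (idx : Int) : Option String :=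
  let name := PySem.Chars.strip (PySem.Chars.slice full (some idx) none)
  if name = [] then none else some (String.ofList name)

-- the for-loop over enumerate(value) with the in_quotes toggle and early return
def pvLoopA (full : List Char) : List (Int × Char) → Bool → Option String
  | [], _ => none
  | (i, c) :: rest, inq =>
    if c = '"' then pvLoopA full rest (!inq)
    else if c = ',' ∧ inq = false then pvRetA full (i + 1)
    else pvLoopA full rest inq

def extract_extinf_name_py (value : String) : Option String :=
  pvLoopA value.toList (PySem.List.enumerate value.toList 0) false

-- ===== PORT B =====
-- value[idx+1:].strip(); 'name or None' (idx + 1 ≥ 0, so the slice is List.drop: exact)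
def pvRetB (full : List Char) (idx : Nat) : Option String :=
  let name := PySem.Chars.strip (full.drop (idx + 1))
  if name = [] then none else some (String.ofList name)

-- the while-loop of Source B: j = value[start:].find(','); idx = start + j;
-- test value[:idx].count('"') % 2 == 0; else start = idx + 1
-- (idx = start + j.toNat, written inline so the recursion equation rewrites cleanly)
def pvLoopB (full : List Char) (start : Nat) : Option String :=
  if hj : PySem.Chars.find (full.drop start) [','] = -1 then none
  else
    if PySem.Chars.count (full.take (start + (PySem.Chars.find (full.drop start) [',']).toNat)) ['"'] % 2 = 0 then
      pvRetB full (start + (PySem.Chars.find (full.drop start) [',']).toNat)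
    else
      pvLoopB full (start + (PySem.Chars.find (full.drop start) [',']).toNat + 1)
termination_by full.length + 1 - start
decreasing_by
  have h1 : [','] <:+: full.drop start :=
    (PySem.Chars.find_ne_neg_one_iff (full.drop start) [',']).mp hj
  have h2 : start < full.length := by
    by_contra h
    have hnil : full.drop start = [] := List.drop_eq_nil_of_le (by omega)
    rw [hnil] at h1
    simp at h1
  omega

def extract_extinf_name_py_alt (value : String) : Option String :=
  pvLoopB value.toList 0

-- ===== PRECONDITION & SPEC =====
def Spec_extract_extinf_name_py (value : String) (out : Option String) : Prop := out = extract_extinf_name_py_alt value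
instance (value : String) (out : Option String) : Decidable (Spec_extract_extinf_name_py value out) := by unfold Spec_extract_extinf_name_py; infer_instance

-- ===== CLAIM (what is proved, stated in full; the proofs are below) =====
def Claim_equal_extract_extinf_name_py : Prop := ∀ (value : String), Dom_extract_extinf_name_py value → Spec_extract_extinf_name_py value (extract_extinf_name_py value)

-- ===== LEMMAS AND PROOFS =====

-- parity of a quote count, as A's in_quotes flag
def pvPar (n : Nat) : Bool := n % 2 == 1

theorem pvPar_succ (n : Nat) : pvPar (n + 1) = !pvPar n := by
  rcases Nat.mod_two_eq_zero_or_one n with h | h <;> simp [pvPar, Nat.add_mod, h]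

theorem pvPar_add (a b : Nat) : pvPar (a + b) = xor (pvPar a) (pvPar b) := by
  rcases Nat.mod_two_eq_zero_or_one a with h | h <;>
    rcases Nat.mod_two_eq_zero_or_one b with h2 | h2 <;>
      simp [pvPar, Nat.add_mod, h, h2]

-- Chars.count with a single-character needle is List.count
theorem pvCountGo (t : List Char) (fuel acc : Nat) (h : t.length ≤ fuel) :
    PySem.Chars.count.go ['"'] fuel t acc = acc + t.count '"' := by
  induction fuel generalizing t acc with
  | zero =>
    match t with
    | [] => simp [PySem.Chars.count.go]
    | c :: _ => simp at h
  | succ f ih =>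
    match t with
    | [] => simp [PySem.Chars.count.go]
    | c :: r =>
      simp only [PySem.Chars.count.go]
      by_cases hc : c = '"'
      · subst hc
        rw [show (['"'].isPrefixOf ('"' :: r)) = true from by simp [List.isPrefixOf]]
        simp only [if_true]
        rw [show List.drop (['"'] : List Char).length ('"' :: r) = r from rfl]
        rw [ih r (acc + 1) (by simp at h; omega)]
        simp
        omega
      · rw [show (['"'].isPrefixOf (c :: r)) = false from by simp [List.isPrefixOf, Ne.symm hc]]
        simp only [Bool.false_eq_true, if_false]
        rw [ih r acc (by simp at h ⊢; omega)]
        simp [hc]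

theorem pvCount (cs : List Char) : PySem.Chars.count cs ['"'] = cs.count '"' := by
  have h := pvCountGo cs cs.length 0 le_rfl
  simpa [PySem.Chars.count] using h

-- A's loop returns none on a comma-free suffix
theorem pvA_none (full : List Char) (cs : List Char) (h : ',' ∉ cs) :
    ∀ (k : Int) (inq : Bool), pvLoopA full (PySem.List.enumerate cs k) inq = none := by
  induction cs with
  | nil => intro k inq; simp [PySem.List.enumerate_nil, pvLoopA]
  | cons c t ih =>
    intro k inq
    simp only [List.mem_cons, not_or] at h
    rw [PySem.List.enumerate_cons]
    by_cases hc : c = '"'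
    · simp only [pvLoopA, hc]
      exact ih h.2 (k + 1) (!inq)
    · simp only [pvLoopA, if_neg hc]
      rw [if_neg (by rintro ⟨h1, _⟩; exact h.1 h1.symm)]
      exact ih h.2 (k + 1) inq

-- A's loop walks over a comma-free block, toggling by the block's quote count
theorem pvWalk (full : List Char) (s0 : List Char) (h : ',' ∉ s0) :
    ∀ (tl : List Char) (k : Int) (inq : Bool),
    pvLoopA full (PySem.List.enumerate (s0 ++ tl) k) inq =
      pvLoopA full (PySem.List.enumerate tl (k + (s0.length : Int))) (xor inq (pvPar (s0.count '"'))) := by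
  induction s0 with
  | nil => intro tl k inq; simp [pvPar]
  | cons c t ih =>
    intro tl k inq
    simp only [List.mem_cons, not_or] at h
    simp only [List.cons_append, PySem.List.enumerate_cons]
    by_cases hc : c = '"'
    · subst hc
      simp only [pvLoopA, if_true]
      rw [ih h.2 tl (k + 1) (!inq)]
      have harith : k + ((('"' :: t).length : Nat) : Int) = k + 1 + (t.length : Int) := by
        push_cast [List.length_cons]
        ring
      rw [harith]
      have hcnt : ('"' :: t).count '"' = t.count '"' + 1 := by simp
      rw [hcnt, pvPar_succ]
      have hx : xor (!inq) (pvPar (t.count '"')) = xor inq (!pvPar (t.count '"')) := by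
        cases inq <;> cases pvPar (t.count '"') <;> rfl
      rw [hx]
    · simp only [pvLoopA]
      rw [if_neg hc]
      rw [if_neg (by rintro ⟨h1, _⟩; exact h.1 h1.symm)]
      rw [ih h.2 tl (k + 1) inq]
      have harith : k + (((c :: t).length : Nat) : Int) = k + 1 + (t.length : Int) := by
        push_cast [List.length_cons]
        ring
      rw [harith]
      have hcnt : (c :: t).count '"' = t.count '"' := by simp [hc]
      rw [hcnt]

-- find decomposition: a found comma splits the suffix at the first comma
theorem pvFindSplit (cs : List Char) (h : PySem.Chars.find cs [','] ≠ -1) :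
    ∃ s0 rest, cs = s0 ++ ',' :: rest ∧ ',' ∉ s0 ∧
      (s0.length : Int) = PySem.Chars.find cs [','] := by
  have hge : 0 ≤ PySem.Chars.find cs [','] := by
    have := PySem.Chars.neg_one_le_find cs [',']
    omega
  obtain ⟨hpre, hmin⟩ := PySem.Chars.find_spec (s := cs) (sub := [',']) hge
  obtain ⟨tl, htl⟩ := hpre
  have hlen : (PySem.Chars.find cs [',']).toNat < cs.length := by
    by_contra hcon
    have hnil : cs.drop (PySem.Chars.find cs [',']).toNat = [] := List.drop_eq_nil_of_le (by omega)
    rw [hnil] at htl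
    simp at htl
  refine ⟨cs.take (PySem.Chars.find cs [',']).toNat, tl, ?_, ?_, ?_⟩
  · rw [show (',' :: tl) = [','] ++ tl from rfl, htl]
    exact (List.take_append_drop _ cs).symm
  · intro hmem
    obtain ⟨i, hi, hgi⟩ := List.mem_iff_getElem.mp hmem
    have hi' : i < (PySem.Chars.find cs [',']).toNat := by
      have := List.length_take_le (PySem.Chars.find cs [',']).toNat cs
      omega
    have hic : i < cs.length := by omega
    apply hmin i hi'
    refine ⟨cs.drop (i + 1), ?_⟩
    have hd : cs.drop i = cs[i] :: cs.drop (i + 1) := List.drop_eq_getElem_cons hic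
    rw [hd]
    have hcg : cs[i] = ',' := by
      rw [← List.getElem_take (h := hi)]
      exact hgi
    simp [hcg]
  · rw [List.length_take]
    have hmn : min (PySem.Chars.find cs [',']).toNat cs.length = (PySem.Chars.find cs [',']).toNat := by omega
    rw [hmn]
    exact Int.toNat_of_nonneg hge

-- a single character is an infix iff it is a member
theorem pvMemInfix (cs : List Char) (h : ',' ∈ cs) : [','] <:+: cs := by
  obtain ⟨s, t, rfl⟩ := List.append_of_mem h
  exact ⟨s, t, by simp⟩

-- the main invariant: B's loop at start equals A's loop on the suffix with the prefix quote parity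
theorem pvMain (full : List Char) : ∀ (m start : Nat), full.length - start ≤ m →
    pvLoopB full start =
      pvLoopA full (PySem.List.enumerate (full.drop start) (start : Int))
        (pvPar ((full.take start).count '"')) := by
  intro m
  induction m with
  | zero =>
    intro start hm
    have hd : full.drop start = [] := List.drop_eq_nil_of_le (by omega)
    rw [pvLoopB, hd]
    rw [dif_pos (by decide)]
    simp [PySem.List.enumerate_nil, pvLoopA]
  | succ m ih =>
    intro start hm
    rw [pvLoopB]
    by_cases hj : PySem.Chars.find (full.drop start) [','] = -1
    · rw [dif_pos hj]
      have hnc : ',' ∉ full.drop start := fun hmem =>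
        (PySem.Chars.find_eq_neg_one_iff (full.drop start) [',']).mp hj (pvMemInfix _ hmem)
      exact (pvA_none full (full.drop start) hnc (start : Int) _).symm
    · rw [dif_neg hj]
      obtain ⟨s0, rest, hsplit, hnc, hlen⟩ := pvFindSplit (full.drop start) hj
      have hge : 0 ≤ PySem.Chars.find (full.drop start) [','] := by
        have := PySem.Chars.neg_one_le_find (full.drop start) [',']
        omega
      have hton : (PySem.Chars.find (full.drop start) [',']).toNat = s0.length := by omega
      rw [hton]
      have hstartlen : start ≤ full.length := by
        by_contra hcon
        have hnil : full.drop start = [] := List.drop_eq_nil_of_le (by omega)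
        rw [hnil] at hsplit
        exact absurd hsplit (by simp)
      have hslen : s0.length + (rest.length + 1) = full.length - start := by
        have hc := congrArg List.length hsplit
        simp [List.length_drop] at hc
        omega
      -- prefix bookkeeping
      have htake : full.take (start + s0.length) = full.take start ++ s0 := by
        rw [List.take_add, hsplit, List.take_left]
      have hdropidx : full.drop (start + s0.length) = ',' :: rest := by
        have hdd : full.drop (start + s0.length) = (full.drop start).drop s0.length := by
          simp [List.drop_drop]
        rw [hdd, hsplit]
        simp
      -- A side: walk the comma-free block, then look at the comma
      rw [hsplit, pvWalk full s0 hnc (',' :: rest) (start : Int)]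
      rw [PySem.List.enumerate_cons]
      have hparx : xor (pvPar ((full.take start).count '"')) (pvPar (s0.count '"'))
          = pvPar ((full.take (start + s0.length)).count '"') := by
        rw [htake, List.count_append, pvPar_add]
      rw [hparx]
      by_cases hpar : PySem.Chars.count (full.take (start + s0.length)) ['"'] % 2 = 0
      · rw [if_pos hpar]
        have hfalse : pvPar ((full.take (start + s0.length)).count '"') = false := by
          rw [← pvCount]
          simp only [pvPar, beq_eq_false_iff_ne, ne_eq]
          omega
        rw [hfalse]
        simp only [pvLoopA]
        unfold pvRetA pvRetB
        rw [PySem.Chars.slice_eq_listSlice]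
        rw [show (start : Int) + (s0.length : Int) + 1 = ((start + s0.length + 1 : Nat) : Int) by push_cast; ring]
        rw [PySem.List.slice_from_natCast]
        simp
      · rw [if_neg hpar]
        have htrue : pvPar ((full.take (start + s0.length)).count '"') = true := by
          rw [← pvCount]
          simp only [pvPar, beq_iff_eq]
          omega
        rw [htrue]
        simp only [pvLoopA]
        rw [ih (start + s0.length + 1) (by omega)]
        have hdrop1 : full.drop (start + s0.length + 1) = rest := by
          have hdd : full.drop (start + s0.length + 1) = (full.drop (start + s0.length)).drop 1 := by
            simp [List.drop_drop]
          rw [hdd, hdropidx]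
          try rfl
        have htake1 : (full.take (start + s0.length + 1)).count '"' = (full.take (start + s0.length)).count '"' := by
          rw [List.take_add, hdropidx]
          simp [List.count_append]
        rw [hdrop1, htake1, htrue]
        rw [show ((start + s0.length + 1 : Nat) : Int) = (start : Int) + (s0.length : Int) + 1 by push_cast; ring]
        rw [if_neg (by decide : ¬ (',' : Char) = '"')]
        rw [if_neg (by simp)]

-- ===== VERDICT (by name: the statement is the Claim_ definition above) =====
theorem extract_extinf_name_py_spec : Claim_equal_extract_extinf_name_py := by
  intro value _
  unfold Spec_extract_extinf_name_py extract_extinf_name_py extract_extinf_name_py_alt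
  have h := pvMain value.toList value.toList.length 0 (by omega)
  simpa [pvPar] using h.symm
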